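-- pv_equiv track=rewrite | github.com/Ryanshuai/auto_pubg | image_detection/search_rects.py | filter_rects
-- ===== SOURCE A (Python) =====
-- def filter_rects(rects, thr=3):
--     res_rects = list()
--     for i in range(len(rects)):
--         i_has_similar = False
--         for j in range(i + 1, len(rects)):
--             is_similar = True
--             for t in range(4):
--                 if abs(rects[i][t] - rects[j][t]) >= thr:
--                     is_similar = False
--             if is_similar:
--                 i_has_similar = True
--                 break
--
--         if not i_has_similar:
--             res_rects.append(rects[i])
--
--     return res_rects
-- ===== SOURCE B (Python) =====
-- def filter_rects(rects, thr=3):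
--     # Spatial hash grid with cell size thr: two rects within Chebyshev distance
--     # < thr on all 4 coordinates must land in the same or an adjacent grid cell,
--     # so each rect is only compared against candidates from 3^4 neighboring cells.
--     if thr <= 0 or len(rects) < 2:
--         return list(rects)
--     cells = [(r[0] // thr, r[1] // thr, r[2] // thr, r[3] // thr) for r in rects]
--     buckets = {}
--     for i in range(len(cells)):
--         buckets.setdefault(cells[i], []).append(i)
--     offs = [(a, b, c, d) for a in (-1, 0, 1) for b in (-1, 0, 1)
--             for c in (-1, 0, 1) for d in (-1, 0, 1)]
--     res = []
--     for i in range(len(rects)):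
--         r = rects[i]
--         ci = cells[i]
--         found = any(
--             j > i and all(abs(r[t] - rects[j][t]) < thr for t in range(4))
--             for off in offs
--             for j in buckets.get((ci[0] + off[0], ci[1] + off[1],
--                                   ci[2] + off[2], ci[3] + off[3]), ())
--         )
--         if not found:
--             res.append(r)
--     return res
-- ===== Notes on version B (the rewrite author's own statement) =====
-- stated objective: alternative
-- what changed: Replaces A's nested all-pairs index scan by a spatial-hash-grid algorithm with cell size thr: rects are bucketed by their 4D grid cell and each rect is compared only against later-indexed candidates drawn from the 3^4 neighboring cells, since Chebyshev-similar rects must fall in adjacent cells.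
import Mathlib
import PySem

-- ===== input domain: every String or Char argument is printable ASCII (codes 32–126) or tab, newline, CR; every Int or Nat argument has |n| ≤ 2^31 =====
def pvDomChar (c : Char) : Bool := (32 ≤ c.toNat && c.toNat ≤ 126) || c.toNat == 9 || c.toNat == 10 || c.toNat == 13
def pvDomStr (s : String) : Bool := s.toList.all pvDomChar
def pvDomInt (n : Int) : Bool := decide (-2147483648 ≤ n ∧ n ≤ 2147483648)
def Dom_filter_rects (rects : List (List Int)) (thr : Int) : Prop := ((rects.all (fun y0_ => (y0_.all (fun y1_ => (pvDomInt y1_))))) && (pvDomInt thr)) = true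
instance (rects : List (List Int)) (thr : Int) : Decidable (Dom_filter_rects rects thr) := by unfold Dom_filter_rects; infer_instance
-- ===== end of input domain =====

-- B replaces A's nested all-pairs scan by a spatial hash grid with cell size thr
-- (an alternative algorithm); same return value, no side effects either way.

-- ===== PORT A =====
-- inner 't' loop of A: starts with is_similar = True, clears it on any coordinate with |diff| >= thr
def pvSimLoopA (ri rj : List Int) (thr : Int) : Bool :=
  (PySem.List.pyRange 0 4 1).foldl
    (fun s t => if thr ≤ |PySem.List.pyGetD ri t 0 - PySem.List.pyGetD rj t 0| then false else s) true

-- 'j' loop of A with its break: first similar j stops the scan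
def pvLoopJA (rects : List (List Int)) (thr : Int) (ri : List Int) : List Int → Bool
  | [] => false
  | j :: js =>
      if pvSimLoopA ri (PySem.List.pyGetD rects j []) thr then true
      else pvLoopJA rects thr ri js

def filter_rects (rects : List (List Int)) (thr : Int) : List (List Int) :=
  (PySem.List.pyRange 0 (rects.length : Int) 1).foldl
    (fun res i =>
      let ri := PySem.List.pyGetD rects i []
      if pvLoopJA rects thr ri (PySem.List.pyRange (i + 1) (rects.length : Int) 1) then res
      else res ++ [ri]) []

-- ===== PORT B =====
-- all(abs(r[t] - rects[j][t]) < thr for t in range(4))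
def pvSimB (r s : List Int) (thr : Int) : Bool :=
  (PySem.List.pyRange 0 4 1).all
    (fun t => decide (|PySem.List.pyGetD r t 0 - PySem.List.pyGetD s t 0| < thr))

-- the 4D grid cell of a rect: (r[0]//thr, r[1]//thr, r[2]//thr, r[3]//thr)
def pvCell (r : List Int) (thr : Int) : List Int :=
  [PySem.Int.floordiv (PySem.List.pyGetD r 0 0) thr,
   PySem.Int.floordiv (PySem.List.pyGetD r 1 0) thr,
   PySem.Int.floordiv (PySem.List.pyGetD r 2 0) thr,
   PySem.Int.floordiv (PySem.List.pyGetD r 3 0) thr]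

-- buckets: for i in range(len(cells)): buckets.setdefault(cells[i], []).append(i)
def pvBuckets (cells : List (List Int)) : PySem.Dict (List Int) (List Int) :=
  (PySem.List.pyRange 0 (cells.length : Int) 1).foldl
    (fun d i =>
      let c := PySem.List.pyGetD cells i []
      d.insert c (d.getD c [] ++ [i]))
    PySem.Dict.empty

-- offs: the 3^4 neighbor offsets, in the comprehension's nesting order
def pvOffs : List (List Int) :=
  [-1, 0, 1].flatMap fun a => [-1, 0, 1].flatMap fun b =>
    [-1, 0, 1].flatMap fun c => [-1, 0, 1].map fun d => [a, b, c, d]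

-- (ci[0]+off[0], ci[1]+off[1], ci[2]+off[2], ci[3]+off[3])
def pvShift (ci off : List Int) : List Int :=
  [PySem.List.pyGetD ci 0 0 + PySem.List.pyGetD off 0 0,
   PySem.List.pyGetD ci 1 0 + PySem.List.pyGetD off 1 0,
   PySem.List.pyGetD ci 2 0 + PySem.List.pyGetD off 2 0,
   PySem.List.pyGetD ci 3 0 + PySem.List.pyGetD off 3 0]

def filter_rects_alt (rects : List (List Int)) (thr : Int) : List (List Int) :=
  if thr ≤ 0 ∨ rects.length < 2 then rects
  else
    let cells := rects.map (fun r => pvCell r thr)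
    let buckets := pvBuckets cells
    (PySem.List.pyRange 0 (rects.length : Int) 1).foldl
      (fun res i =>
        let r := PySem.List.pyGetD rects i []
        let ci := PySem.List.pyGetD cells i []
        let found := pvOffs.any (fun off =>
          (buckets.getD (pvShift ci off) []).any
            (fun j => decide (i < j) && pvSimB r (PySem.List.pyGetD rects j []) thr))
        if found then res else res ++ [r]) []

-- ===== PRECONDITION & SPEC =====
-- A indexes rects[i][t] for t = 0..3 on every rect as soon as rects has two elements;
-- Pre_ excludes exactly the inputs where that raises IndexError (a rect shorter than 4).
def Pre_filter_rects (rects : List (List Int)) (thr : Int) : Prop :=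
  rects.length ≤ 1 ∨ ∀ r ∈ rects, 4 ≤ r.length
instance (rects : List (List Int)) (thr : Int) : Decidable (Pre_filter_rects rects thr) := by
  unfold Pre_filter_rects; infer_instance

def pvWitness_filter_rects : List (List Int) × Int := ([[0, 0, 0, 0], [10, 10, 10, 10]], 3)

def Spec_filter_rects (rects : List (List Int)) (thr : Int) (out : List (List Int)) : Prop := out = filter_rects_alt rects thr
instance (rects : List (List Int)) (thr : Int) (out : List (List Int)) : Decidable (Spec_filter_rects rects thr out) := by unfold Spec_filter_rects; infer_instance

-- ===== CLAIM (what is proved, stated in full; the proofs are below) =====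
def Claim_equal_filter_rects : Prop := ∀ (rects : List (List Int)) (thr : Int), Dom_filter_rects rects thr → Pre_filter_rects rects thr → Spec_filter_rects rects thr (filter_rects rects thr)

-- ===== LEMMAS AND PROOFS =====

-- reference function: keep a rect iff no later rect is similar
def pvKeep (thr : Int) : List (List Int) → List (List Int)
  | [] => []
  | r :: rs => if rs.any (fun s => pvSimB r s thr) then pvKeep thr rs else r :: pvKeep thr rs

theorem pvSimLoopA_eq (ri rj : List Int) (thr : Int) :
    pvSimLoopA ri rj thr = pvSimB ri rj thr := by
  have h4 : PySem.List.pyRange 0 4 1 = [0, 1, 2, 3] := by decide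
  simp only [pvSimLoopA, pvSimB, h4, List.foldl, List.all]
  split_ifs <;> simp_all

theorem pvLoopJA_eq (rects : List (List Int)) (thr : Int) (ri : List Int) (js : List Int) :
    pvLoopJA rects thr ri js
      = js.any (fun j => pvSimB ri (PySem.List.pyGetD rects j []) thr) := by
  induction js with
  | nil => simp [pvLoopJA]
  | cons j js ih => simp [pvLoopJA, pvSimLoopA_eq, ih]

theorem pvA_fold (thr : Int) (rects : List (List Int)) :
    ∀ (l : List (List Int)) (a : Int) (acc : List (List Int)), 0 ≤ a → rects.drop a.toNat = l →
    (PySem.List.pyRange a (rects.length : Int) 1).foldl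
      (fun res i =>
        if ((rects.drop (i + 1).toNat).any
              (fun s => pvSimB (PySem.List.pyGetD rects i []) s thr)) then res
        else res ++ [PySem.List.pyGetD rects i []]) acc
      = acc ++ pvKeep thr l := by
  intro l
  induction l with
  | nil =>
    intro a acc ha hd
    have hlen : (rects.length : Int) ≤ a := by
      have := List.drop_eq_nil_iff.mp hd
      omega
    rw [PySem.List.pyRange_one_eq_nil hlen]
    simp [pvKeep]
  | cons r rs ih =>
    intro a acc ha hd
    have hlt : a.toNat < rects.length := by
      by_contra h
      rw [List.drop_eq_nil_iff.mpr (by omega)] at hd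
      simp at hd
    have haInt : a < (rects.length : Int) := by omega
    have hcd := List.getElem_cons_drop (as := rects) (i := a.toNat) hlt
    rw [hd] at hcd
    injection hcd with hget hdrop0
    have hdrop1 : rects.drop (a + 1).toNat = rs := by
      have he : (a + 1).toNat = a.toNat + 1 := by omega
      rw [he, hdrop0]
    rw [PySem.List.pyRange_one_cons haInt]
    simp only [List.foldl_cons]
    rw [PySem.List.pyGetD_eq_getElem rects ([] : List Int) ha (by exact_mod_cast haInt), hget, hdrop1]
    by_cases hs : rs.any (fun s => pvSimB r s thr)
    · rw [if_pos hs, ih (a + 1) acc (by omega) hdrop1]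
      simp [pvKeep, hs]
    · rw [if_neg hs, ih (a + 1) (acc ++ [r]) (by omega) hdrop1]
      simp [pvKeep, hs]

theorem pvA_eq_keep (rects : List (List Int)) (thr : Int) :
    filter_rects rects thr = pvKeep thr rects := by
  unfold filter_rects
  have hcong :
      (PySem.List.pyRange 0 (rects.length : Int) 1).foldl
        (fun res i =>
          let ri := PySem.List.pyGetD rects i []
          if pvLoopJA rects thr ri (PySem.List.pyRange (i + 1) (rects.length : Int) 1) then res
          else res ++ [ri]) []
      = (PySem.List.pyRange 0 (rects.length : Int) 1).foldl
        (fun res i =>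
          if ((rects.drop (i + 1).toNat).any
                (fun s => pvSimB (PySem.List.pyGetD rects i []) s thr)) then res
          else res ++ [PySem.List.pyGetD rects i []]) [] := by
    apply PySem.List.foldl_congr_mem
    intro acc i hi
    have hi0 : 0 ≤ i := (PySem.List.mem_pyRange_one.mp hi).1
    have hmap :
        (PySem.List.pyRange (i + 1) (rects.length : Int) 1).map
          (fun j => PySem.List.pyGetD rects j ([] : List Int)) = rects.drop (i + 1).toNat :=
      PySem.List.map_pyGetD_pyRange' rects ([] : List Int) (by omega)
    simp only [pvLoopJA_eq]
    rw [← hmap, List.any_map]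
    rfl
  rw [hcong, pvA_fold thr rects rects 0 [] le_rfl (by simp)]
  simp

-- thr ≤ 0 makes nothing similar, so pvKeep keeps everything
theorem pvSimB_nonpos (r s : List Int) (thr : Int) (h : thr ≤ 0) :
    pvSimB r s thr = false := by
  have h4 : PySem.List.pyRange 0 4 1 = [0, 1, 2, 3] := by decide
  simp only [pvSimB, h4, List.all]
  have h0 : ¬ (|PySem.List.pyGetD r 0 0 - PySem.List.pyGetD s 0 0| < thr) := by
    have := abs_nonneg (PySem.List.pyGetD r 0 0 - PySem.List.pyGetD s 0 0)
    omega
  simp [h0]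

theorem pvKeep_nonpos (thr : Int) (h : thr ≤ 0) (l : List (List Int)) :
    pvKeep thr l = l := by
  induction l with
  | nil => rfl
  | cons r rs ih => simp [pvKeep, pvSimB_nonpos _ _ _ h, ih]

-- floor-division adjacency: points within < thr land in the same or an adjacent cell
theorem pvFloorAdj (thr x y : Int) (hthr : 0 < thr) (h : |x - y| < thr) :
    -1 ≤ PySem.Int.floordiv y thr - PySem.Int.floordiv x thr ∧
      PySem.Int.floordiv y thr - PySem.Int.floordiv x thr ≤ 1 := by
  rw [PySem.Int.floordiv_eq_ediv_of_pos hthr, PySem.Int.floordiv_eq_ediv_of_pos hthr]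
  have hx : thr * (x / thr) + x % thr = x := Int.ediv_add_emod x thr
  have hy : thr * (y / thr) + y % thr = y := Int.ediv_add_emod y thr
  have hx1 : 0 ≤ x % thr := Int.emod_nonneg x (by omega)
  have hx2 : x % thr < thr := Int.emod_lt_of_pos x hthr
  have hy1 : 0 ≤ y % thr := Int.emod_nonneg y (by omega)
  have hy2 : y % thr < thr := Int.emod_lt_of_pos y hthr
  have habs := abs_lt.mp h
  constructor
  · by_contra hc
    push_neg at hc
    have h2 : y / thr - x / thr ≤ -2 := by omega
    have hmul : thr * (y / thr - x / thr) ≤ thr * (-2) :=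
      mul_le_mul_of_nonneg_left h2 hthr.le
    nlinarith
  · by_contra hc
    push_neg at hc
    have h2 : 2 ≤ y / thr - x / thr := by omega
    have hmul : thr * 2 ≤ thr * (y / thr - x / thr) :=
      mul_le_mul_of_nonneg_left h2 hthr.le
    nlinarith

-- unfolding pvSimB on the literal range [0,1,2,3]
theorem pvSimB_iff (r s : List Int) (thr : Int) :
    pvSimB r s thr = true ↔
      (|PySem.List.pyGetD r 0 0 - PySem.List.pyGetD s 0 0| < thr ∧
       |PySem.List.pyGetD r 1 0 - PySem.List.pyGetD s 1 0| < thr ∧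
       |PySem.List.pyGetD r 2 0 - PySem.List.pyGetD s 2 0| < thr ∧
       |PySem.List.pyGetD r 3 0 - PySem.List.pyGetD s 3 0| < thr) := by
  have h4 : PySem.List.pyRange 0 4 1 = [0, 1, 2, 3] := by decide
  simp [pvSimB, h4]

-- a similar rect's cell is reachable from r's cell by some offset in pvOffs
theorem pvExistsOff (r s : List Int) (thr : Int) (hthr : 0 < thr)
    (hsim : pvSimB r s thr = true) :
    ∃ off ∈ pvOffs, pvShift (pvCell r thr) off = pvCell s thr := by
  obtain ⟨h0, h1, h2, h3⟩ := (pvSimB_iff r s thr).mp hsim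
  have a0 := pvFloorAdj thr _ _ hthr h0
  have a1 := pvFloorAdj thr _ _ hthr h1
  have a2 := pvFloorAdj thr _ _ hthr h2
  have a3 := pvFloorAdj thr _ _ hthr h3
  refine ⟨[PySem.Int.floordiv (PySem.List.pyGetD s 0 0) thr - PySem.Int.floordiv (PySem.List.pyGetD r 0 0) thr,
           PySem.Int.floordiv (PySem.List.pyGetD s 1 0) thr - PySem.Int.floordiv (PySem.List.pyGetD r 1 0) thr,
           PySem.Int.floordiv (PySem.List.pyGetD s 2 0) thr - PySem.Int.floordiv (PySem.List.pyGetD r 2 0) thr,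
           PySem.Int.floordiv (PySem.List.pyGetD s 3 0) thr - PySem.Int.floordiv (PySem.List.pyGetD r 3 0) thr], ?_, ?_⟩
  · simp only [pvOffs, List.mem_flatMap, List.mem_map]
    refine ⟨_, ?_, _, ?_, _, ?_, _, ?_, rfl⟩ <;> simp <;> omega
  · have i0 : PySem.List.pyIdx? 4 (0 : Int) = some 0 := by decide
    have i1 : PySem.List.pyIdx? 4 (1 : Int) = some 1 := by decide
    have i2 : PySem.List.pyIdx? 4 (2 : Int) = some 2 := by decide
    have i3 : PySem.List.pyIdx? 4 (3 : Int) = some 3 := by decide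
    simp only [pvShift, pvCell, PySem.List.pyGetD, PySem.List.pyGet?, List.length_cons,
      List.length_nil, Nat.reduceAdd, i0, i1, i2, i3, Option.bind_some,
      List.getElem?_cons_zero, List.getElem?_cons_succ, Option.getD_some,
      List.cons.injEq, and_true]
    refine ⟨by ring, by ring, by ring, by ring⟩

-- bucket membership: j ∈ buckets[c] iff j is a valid index whose cell is c
theorem pvBuckets_fold (cells : List (List Int)) :
    ∀ (m : Nat) (a : Int) (d : PySem.Dict (List Int) (List Int)),
      0 ≤ a → a ≤ (cells.length : Int) → ((cells.length : Int) - a).toNat = m →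
      (∀ c j, j ∈ d.getD c [] ↔ 0 ≤ j ∧ j < a ∧ PySem.List.pyGetD cells j [] = c) →
      ∀ c j,
        j ∈ ((PySem.List.pyRange a (cells.length : Int) 1).foldl
              (fun d i =>
                let c := PySem.List.pyGetD cells i []
                d.insert c (d.getD c [] ++ [i])) d).getD c []
          ↔ 0 ≤ j ∧ j < (cells.length : Int) ∧ PySem.List.pyGetD cells j [] = c := by
  intro m
  induction m with
  | zero =>
    intro a d ha hale hm hinv c j
    have hae : a = (cells.length : Int) := by omega
    rw [PySem.List.pyRange_one_eq_nil (by omega)]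
    simp only [List.foldl_nil]
    rw [hinv c j, hae]
  | succ m ih =>
    intro a d ha hale hm hinv c j
    have hlt : a < (cells.length : Int) := by omega
    rw [PySem.List.pyRange_one_cons hlt]
    simp only [List.foldl_cons]
    apply ih (a + 1) _ (by omega) (by omega) (by omega)
    intro c' j'
    rw [PySem.Dict.getD_insert]
    by_cases hc : c' = PySem.List.pyGetD cells a []
    · subst hc
      rw [if_pos rfl]
      simp only [List.mem_append, List.mem_singleton, hinv]
      constructor
      · rintro (⟨h1, h2, h3⟩ | rfl)
        · exact ⟨h1, by omega, h3⟩
        · exact ⟨ha, by omega, rfl⟩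
      · rintro ⟨h1, h2, h3⟩
        by_cases hj : j' = a
        · exact Or.inr hj
        · exact Or.inl ⟨h1, by omega, h3⟩
    · rw [if_neg hc]
      rw [hinv c' j']
      constructor
      · rintro ⟨h1, h2, h3⟩; exact ⟨h1, by omega, h3⟩
      · rintro ⟨h1, h2, h3⟩
        refine ⟨h1, ?_, h3⟩
        by_cases hj : j' = a
        · subst hj; exact absurd h3.symm hc
        · omega

theorem pvBuckets_mem (cells : List (List Int)) (c : List Int) (j : Int) :
    j ∈ (pvBuckets cells).getD c []
      ↔ 0 ≤ j ∧ j < (cells.length : Int) ∧ PySem.List.pyGetD cells j [] = c := by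
  unfold pvBuckets
  exact pvBuckets_fold cells ((cells.length : Int) - 0).toNat 0 PySem.Dict.empty le_rfl
    (by omega) rfl (by
      intro c j
      constructor
      · intro h
        simp [PySem.Dict.empty, PySem.Dict.getD, PySem.Dict.get?] at h
      · rintro ⟨h1, h2, _⟩
        omega) c j

-- the grid query finds a later similar rect iff one exists (per outer index i)
theorem pvFoundB (rects : List (List Int)) (thr : Int) (hthr : 0 < thr)
    (i : Int) (hi0 : 0 ≤ i) (hilt : i < (rects.length : Int)) :
    (pvOffs.any fun off =>
        ((pvBuckets (rects.map (fun r => pvCell r thr))).getD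
            (pvShift (PySem.List.pyGetD (rects.map (fun r => pvCell r thr)) i []) off) []).any
          (fun j => decide (i < j) && pvSimB (PySem.List.pyGetD rects i [])
              (PySem.List.pyGetD rects j []) thr))
      = (rects.drop (i + 1).toNat).any
          (fun s => pvSimB (PySem.List.pyGetD rects i []) s thr) := by
  set cells := rects.map (fun r => pvCell r thr) with hcells
  have hclen : (cells.length : Int) = (rects.length : Int) := by simp [hcells]
  have hcellAt : ∀ (k : Int), 0 ≤ k → k < (rects.length : Int) →
      PySem.List.pyGetD cells k [] = pvCell (PySem.List.pyGetD rects k []) thr := by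
    intro k hk0 hklt
    rw [PySem.List.pyGetD_eq_getElem cells ([] : List Int) hk0 (by omega),
      PySem.List.pyGetD_eq_getElem rects ([] : List Int) hk0 (by exact_mod_cast hklt)]
    simp [hcells]
  have hmap :
      (PySem.List.pyRange (i + 1) (rects.length : Int) 1).map
        (fun j => PySem.List.pyGetD rects j ([] : List Int)) = rects.drop (i + 1).toNat :=
    PySem.List.map_pyGetD_pyRange' rects ([] : List Int) (by omega)
  rw [← hmap, List.any_map]
  rw [Bool.eq_iff_iff]
  simp only [List.any_eq_true]
  constructor
  · rintro ⟨off, hoff, j, hj, hcond⟩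
    obtain ⟨hj0, hjlt, _⟩ := (pvBuckets_mem cells _ j).mp hj
    simp only [Bool.and_eq_true, decide_eq_true_eq] at hcond
    exact ⟨j, PySem.List.mem_pyRange_one.mpr ⟨by omega, by omega⟩, hcond.2⟩
  · rintro ⟨j, hj, hcond⟩
    obtain ⟨hj1, hj2⟩ := PySem.List.mem_pyRange_one.mp hj
    have hsim : pvSimB (PySem.List.pyGetD rects i []) (PySem.List.pyGetD rects j []) thr = true := hcond
    obtain ⟨off, hoff, hshift⟩ :=
      pvExistsOff (PySem.List.pyGetD rects i []) (PySem.List.pyGetD rects j []) thr hthr hsim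
    refine ⟨off, hoff, j, ?_, ?_⟩
    · rw [pvBuckets_mem]
      refine ⟨by omega, by omega, ?_⟩
      rw [hcellAt j (by omega) hj2, hcellAt i hi0 hilt] at *
      rw [hshift]
    · simp only [Bool.and_eq_true, decide_eq_true_eq]
      exact ⟨by omega, hsim⟩

theorem pvB_eq_keep (rects : List (List Int)) (thr : Int) :
    filter_rects_alt rects thr = pvKeep thr rects := by
  unfold filter_rects_alt
  by_cases hcase : thr ≤ 0 ∨ rects.length < 2
  · rw [if_pos hcase]
    rcases hcase with h | h
    · exact (pvKeep_nonpos thr h rects).symm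
    · match rects, h with
      | [], _ => rfl
      | [r], _ => simp [pvKeep]
  · rw [if_neg hcase]
    push_neg at hcase
    obtain ⟨hthr, _⟩ := hcase
    have hcong :
        (PySem.List.pyRange 0 (rects.length : Int) 1).foldl
          (fun res i =>
            let r := PySem.List.pyGetD rects i []
            let ci := PySem.List.pyGetD (rects.map (fun r => pvCell r thr)) i []
            let found := pvOffs.any (fun off =>
              ((pvBuckets (rects.map (fun r => pvCell r thr))).getD (pvShift ci off) []).any
                (fun j => decide (i < j) && pvSimB r (PySem.List.pyGetD rects j []) thr))
            if found then res else res ++ [r]) []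
        = (PySem.List.pyRange 0 (rects.length : Int) 1).foldl
          (fun res i =>
            if ((rects.drop (i + 1).toNat).any
                  (fun s => pvSimB (PySem.List.pyGetD rects i []) s thr)) then res
            else res ++ [PySem.List.pyGetD rects i []]) [] := by
      apply PySem.List.foldl_congr_mem
      intro acc i hi
      obtain ⟨hi0, hilt⟩ := PySem.List.mem_pyRange_one.mp hi
      simp only
      rw [pvFoundB rects thr (by omega) i hi0 hilt]
    rw [hcong, pvA_fold thr rects rects 0 [] le_rfl (by simp)]
    simp

-- ===== VERDICT (by name: the statement is the Claim_ definition above) =====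
theorem filter_rects_spec : Claim_equal_filter_rects := by
  intro rects thr _ _
  unfold Spec_filter_rects
  rw [pvA_eq_keep, pvB_eq_keep]
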